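-- pv_equiv track=rewrite | github.com/rahulsamant37/Daily-Task | Python/python_question_287.py | longest_increasing_subsequence_with_diff
-- ===== SOURCE A (Python) =====
-- def longest_increasing_subsequence_with_diff(nums, diff):
--     """
--     Finds the length of the longest increasing subsequence with a specific difference.
--
--     Args:
--         nums: A list of integers.
--         diff: The required difference between consecutive elements in the subsequence.
--
--     Returns:
--         The length of the longest increasing subsequence with the specified difference.
--     """
--     # Use a dictionary to store the length of the longest subsequence ending at each number.
--     # Key: number, Value: length of the longest subsequence ending at that number
--     dp = {}
--
--     # Iterate through the numbers in the input array.
--     for num in nums: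
--         # Calculate the value of the previous number in the desired subsequence.
--         prev_num = num - diff
--
--         # If the previous number exists in the dp dictionary, it means we can extend an existing subsequence.
--         if prev_num in dp:
--             # Extend the subsequence ending at prev_num by adding the current number.
--             dp[num] = dp[prev_num] + 1
--         else:
--             # If the previous number doesn't exist, start a new subsequence of length 1.
--             dp[num] = 1
--
--     # Return the maximum value in the dp dictionary, which represents the length of the longest subsequence.
--     return max(dp.values()) if dp else 0  # Handle the case where nums is empty.
-- ===== SOURCE B (Python) =====
-- def longest_increasing_subsequence_with_diff(nums, diff):
--     # O(n^2) index-free dynamic program over earlier elements instead of a value-keyed hash map.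
--     L = []
--     for x in nums:
--         best = 0
--         for y, l in zip(nums, L):
--             if x - y == diff and l > best:
--                 best = l
--         L.append(best + 1)
--     return max(L) if L else 0
-- ===== Notes on version B (the rewrite author's own statement) =====
-- stated objective: alternative
-- what changed: Replaced A's one-pass value-keyed hash map (dp[num] = dp[num-diff]+1) by an index-free O(n^2) dynamic program that, for each element, scans all previously processed elements for the best chain predecessor and appends the chain length to a list.
import Mathlib
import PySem

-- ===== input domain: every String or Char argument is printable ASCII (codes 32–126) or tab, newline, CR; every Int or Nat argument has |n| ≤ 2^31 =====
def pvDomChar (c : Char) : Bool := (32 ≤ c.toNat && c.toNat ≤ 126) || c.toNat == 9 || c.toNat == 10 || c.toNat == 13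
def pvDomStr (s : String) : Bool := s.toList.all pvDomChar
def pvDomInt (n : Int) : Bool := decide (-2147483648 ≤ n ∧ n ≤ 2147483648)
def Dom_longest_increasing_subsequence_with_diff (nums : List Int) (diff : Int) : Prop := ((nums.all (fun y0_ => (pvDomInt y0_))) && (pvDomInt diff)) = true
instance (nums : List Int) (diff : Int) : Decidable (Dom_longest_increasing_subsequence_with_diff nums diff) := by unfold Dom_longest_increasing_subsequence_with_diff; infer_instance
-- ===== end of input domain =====

-- B replaces A's one-pass value-keyed hash map by an O(n^2) dynamic program that, for each
-- element, scans all earlier elements for chain predecessors (objective: alternative, not faster).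

-- ===== PORT A =====
-- one loop iteration of A: record the chain length ending at num in the dict
def pvStepA (diff : Int) (dp : PySem.Dict Int Int) (num : Int) : PySem.Dict Int Int :=
  if dp.contains (num - diff) then dp.insert num (dp.getD (num - diff) 0 + 1)
  else dp.insert num 1

def longest_increasing_subsequence_with_diff (nums : List Int) (diff : Int) : Int :=
  let dp := nums.foldl (pvStepA diff) PySem.Dict.empty
  match PySem.List.max? dp.values (fun v => v) with
  | some m => m
  | none => 0

-- ===== PORT B =====
-- B's inner loop: best chain length among processed elements (y, l) with x - y == diff
def pvBest (diff x : Int) (pairs : List (Int × Int)) : Int :=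
  pairs.foldl (fun best p => if x - p.1 = diff ∧ best < p.2 then p.2 else best) 0

def longest_increasing_subsequence_with_diff_alt (nums : List Int) (diff : Int) : Int :=
  let L := nums.foldl (fun L x => L ++ [pvBest diff x (nums.zip L) + 1]) []
  match PySem.List.max? L (fun v => v) with
  | some m => m
  | none => 0

-- ===== PRECONDITION & SPEC =====
def Spec_longest_increasing_subsequence_with_diff (nums : List Int) (diff : Int) (out : Int) : Prop := out = longest_increasing_subsequence_with_diff_alt nums diff
instance (nums : List Int) (diff : Int) (out : Int) : Decidable (Spec_longest_increasing_subsequence_with_diff nums diff out) := by unfold Spec_longest_increasing_subsequence_with_diff; infer_instance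

-- ===== CLAIM (what is proved, stated in full; the proofs are below) =====
def Claim_equal_longest_increasing_subsequence_with_diff : Prop := ∀ (nums : List Int) (diff : Int), Dom_longest_increasing_subsequence_with_diff nums diff → Spec_longest_increasing_subsequence_with_diff nums diff (longest_increasing_subsequence_with_diff nums diff)

-- ===== LEMMAS AND PROOFS =====

-- the pair-state form of B's loop: append (x, best + 1)
def pvStepS (diff : Int) (S : List (Int × Int)) (x : Int) : List (Int × Int) :=
  S ++ [(x, pvBest diff x S + 1)]

-- invariant tying A's dict to the list S of (value, chain length) pairs B has produced so far
def pvInv (diff : Int) (dp : PySem.Dict Int Int) (S : List (Int × Int)) : Prop :=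
  dp.keys.Nodup ∧
  (∀ q ∈ S, 1 ≤ q.2) ∧
  (∀ q ∈ S, q.2 ≤ pvBest diff q.1 S + 1) ∧
  (∀ v, dp.get? v = none ↔ ∀ q ∈ S, q.1 ≠ v) ∧
  (∀ v m, dp.get? v = some m → (v, m) ∈ S ∧ ∀ q ∈ S, q.1 = v → q.2 ≤ m)

lemma pvBest_init_le (diff x : Int) (S : List (Int × Int)) :
    ∀ a : Int, a ≤ S.foldl (fun best p => if x - p.1 = diff ∧ best < p.2 then p.2 else best) a := by
  induction S with
  | nil => intro a; simp
  | cons q t ih =>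
      intro a
      simp only [List.foldl_cons]
      refine le_trans ?_ (ih _)
      split_ifs with h
      · exact le_of_lt h.2
      · exact le_rfl
lemma pvBest_ub (diff x : Int) (S : List (Int × Int)) :
    ∀ (a : Int) (q : Int × Int), q ∈ S → x - q.1 = diff →
      q.2 ≤ S.foldl (fun best p => if x - p.1 = diff ∧ best < p.2 then p.2 else best) a := by
  induction S with
  | nil => intro a q h; simp at h
  | cons r t ih =>
      intro a q hq hx
      simp only [List.foldl_cons]
      rcases List.mem_cons.mp hq with h | h
      · subst h
        refine le_trans ?_ (pvBest_init_le diff x t _)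
        split_ifs with h
        · exact le_rfl
        · rw [not_and, not_lt] at h; exact h hx
      · exact ih _ q h hx
lemma pvBest_attained (diff x : Int) (S : List (Int × Int)) :
    ∀ a : Int, S.foldl (fun best p => if x - p.1 = diff ∧ best < p.2 then p.2 else best) a = a ∨
      ∃ q ∈ S, x - q.1 = diff ∧
        q.2 = S.foldl (fun best p => if x - p.1 = diff ∧ best < p.2 then p.2 else best) a := by
  induction S with
  | nil => intro a; left; simp
  | cons r t ih =>
      intro a
      simp only [List.foldl_cons]
      split_ifs with h
      · rcases ih r.2 with h2 | ⟨q, hq, hx, he⟩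
        · right; exact ⟨r, List.mem_cons_self .., h.1, h2.symm⟩
        · right; exact ⟨q, List.mem_cons_of_mem _ hq, hx, he⟩
      · rcases ih a with h2 | ⟨q, hq, hx, he⟩
        · left; exact h2
        · right; exact ⟨q, List.mem_cons_of_mem _ hq, hx, he⟩
lemma pvBest_append_singleton (diff x : Int) (S : List (Int × Int)) (q : Int × Int) :
    pvBest diff x (S ++ [q]) =
      if x - q.1 = diff ∧ pvBest diff x S < q.2 then q.2 else pvBest diff x S := by
  simp [pvBest, List.foldl_append]
lemma pvBest_le_append_singleton (diff x : Int) (S : List (Int × Int)) (q : Int × Int) :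
    pvBest diff x S ≤ pvBest diff x (S ++ [q]) := by
  rw [pvBest_append_singleton]
  split_ifs with h
  · exact le_of_lt h.2
  · exact le_rfl
lemma pvBest_nonneg (diff x : Int) (S : List (Int × Int)) : 0 ≤ pvBest diff x S :=
  pvBest_init_le diff x S 0

-- generic step: inserting (x, b+1) with b = pvBest preserves the invariant
lemma pvInv_insert (diff : Int) (dp : PySem.Dict Int Int) (S : List (Int × Int)) (x : Int)
    (h : pvInv diff dp S) :
    pvInv diff (dp.insert x (pvBest diff x S + 1)) (S ++ [(x, pvBest diff x S + 1)]) := by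
  obtain ⟨hnd, h1, h2, h3, h4⟩ := h
  set b := pvBest diff x S with hbdef
  refine ⟨PySem.Dict.nodup_keys_insert _ _ _ hnd, ?_, ?_, ?_, ?_⟩
  · intro q hq
    rcases List.mem_append.mp hq with h | h
    · exact h1 q h
    · simp at h; rw [h]
      have := pvBest_nonneg diff x S; omega
  · intro q hq
    rcases List.mem_append.mp hq with h | h
    · calc q.2 ≤ pvBest diff q.1 S + 1 := h2 q h
           _ ≤ pvBest diff q.1 (S ++ [(x, b + 1)]) + 1 := by
              have := pvBest_le_append_singleton diff q.1 S (x, b + 1); omega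
    · simp at h; rw [h]
      have := pvBest_le_append_singleton diff x S (x, b + 1)
      simp only []; omega
  · intro v
    rw [PySem.Dict.get?_insert]
    by_cases hv : v = x
    · rw [if_pos hv]
      constructor
      · intro hcon; exact absurd hcon (by simp)
      · intro hall
        exact absurd hv.symm (hall (x, b + 1) (List.mem_append_right _ (by simp)))
    · rw [if_neg hv]
      rw [h3 v]
      constructor
      · intro hall q hq
        rcases List.mem_append.mp hq with h | h
        · exact hall q h
        · simp at h; rw [h]; simpa using (Ne.symm hv)
      · intro hall q hq; exact hall q (List.mem_append_left _ hq)
  · intro v m hm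
    rw [PySem.Dict.get?_insert] at hm
    by_cases hv : v = x
    · rw [if_pos hv] at hm
      obtain rfl : m = b + 1 := by simpa using hm.symm
      constructor
      · rw [hv]; exact List.mem_append_right _ (by simp)
      · intro q hq hq1
        rcases List.mem_append.mp hq with h | h
        · have hle := h2 q h
          rw [hq1, hv] at hle
          omega
        · simp at h; subst h; simp
    · rw [if_neg hv] at hm
      obtain ⟨hmem, hub⟩ := h4 v m hm
      constructor
      · exact List.mem_append_left _ hmem
      · intro q hq hq1
        rcases List.mem_append.mp hq with h | h
        · exact hub q h hq1
        · simp at h; subst h; simp at hq1; exact absurd hq1 (Ne.symm hv)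

lemma pvInv_step (diff : Int) (dp : PySem.Dict Int Int) (S : List (Int × Int)) (x : Int)
    (h : pvInv diff dp S) : pvInv diff (pvStepA diff dp x) (pvStepS diff S x) := by
  have hstep : pvStepA diff dp x = dp.insert x (pvBest diff x S + 1) := by
    obtain ⟨hnd, h1, h2, h3, h4⟩ := h
    unfold pvStepA
    cases hg : dp.get? (x - diff) with
    | none =>
        have hc : dp.contains (x - diff) = false := by
          rw [PySem.Dict.contains_eq_isSome_get?, hg]; rfl
        rw [hc, if_neg (by simp)]
        have hb : pvBest diff x S = 0 := by
          rcases pvBest_attained diff x S 0 with h0 | ⟨q, hq, hx, he⟩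
          · exact h0
          · have : q.1 = x - diff := by omega
            exact absurd this ((h3 (x - diff)).mp hg q hq)
        rw [hb]; norm_num
    | some k =>
        have hc : dp.contains (x - diff) = true := by
          rw [PySem.Dict.contains_eq_isSome_get?, hg]; rfl
        rw [hc, if_pos rfl]
        obtain ⟨hmem, hub⟩ := h4 (x - diff) k hg
        have hb : pvBest diff x S = k := by
          have le1 : k ≤ pvBest diff x S := by
            have := pvBest_ub diff x S 0 (x - diff, k) hmem (by omega)
            exact this
          have le2 : pvBest diff x S ≤ k := by
            rcases pvBest_attained diff x S 0 with h0 | ⟨q, hq, hx, he⟩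
            · have hk1 := h1 _ hmem; simp only [pvBest]; omega
            · have : q.1 = x - diff := by omega
              have := hub q hq this
              simp only [pvBest]; omega
          omega
        rw [PySem.Dict.getD_eq_get?_getD, hg, hb]; rfl
  rw [hstep]
  exact pvInv_insert diff dp S x h

lemma pvZip_trunc (p t : List Int) (L : List Int) (h : L.length = p.length) :
    (p ++ t).zip L = p.zip L := by
  have h2 := List.zip_append (l₁ := p) (l₂ := L) (r₁ := t) (r₂ := ([] : List Int)) h.symm
  simpa using h2
lemma pvZipB (diff : Int) :
    ∀ (r p L : List Int), L.length = p.length →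
      (r.foldl (fun L x => L ++ [pvBest diff x ((p ++ r).zip L) + 1]) L).length = (p ++ r).length ∧
      (p ++ r).zip (r.foldl (fun L x => L ++ [pvBest diff x ((p ++ r).zip L) + 1]) L) =
        r.foldl (pvStepS diff) (p.zip L) := by
  intro r
  induction r with
  | nil =>
      intro p L h
      constructor
      · simpa using h
      · simp
  | cons x t ih =>
      intro p L h
      have htr : (p ++ x :: t).zip L = p.zip L := pvZip_trunc p (x :: t) L h
      have hassoc : p ++ x :: t = (p ++ [x]) ++ t := by simp
      have hlen1 : (L ++ [pvBest diff x (p.zip L) + 1]).length = (p ++ [x]).length := by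
        simp [h]
      have ihx := ih (p ++ [x]) (L ++ [pvBest diff x (p.zip L) + 1]) hlen1
      have hzx : (p ++ [x]).zip (L ++ [pvBest diff x (p.zip L) + 1]) =
          pvStepS diff (p.zip L) x := by
        rw [List.zip_append h.symm]; rfl
      rw [hzx] at ihx
      simp only [List.foldl_cons, hassoc]
      rw [show ((p ++ [x]) ++ t).zip L = p.zip L from by simpa using pvZip_trunc p ([x] ++ t) L h]
      exact ihx

lemma pvExtract (diff : Int) (dp : PySem.Dict Int Int) (S : List (Int × Int))
    (h : pvInv diff dp S) :
    (match PySem.List.max? dp.values (fun v => v) with | some m => m | none => 0) =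
    (match PySem.List.max? (S.map Prod.snd) (fun v => v) with | some m => m | none => 0) := by
  obtain ⟨hnd, h1, h2, h3, h4⟩ := h
  have fact1 : ∀ m ∈ dp.values, m ∈ S.map Prod.snd := by
    intro m hm
    simp only [PySem.Dict.values, List.mem_map] at hm
    obtain ⟨p, hp, hpm⟩ := hm
    have hg := PySem.Dict.get?_of_mem_items (d := dp) (k := p.1) (v := p.2) (by simpa using hp) hnd
    have := (h4 p.1 p.2 hg).1
    exact List.mem_map.mpr ⟨(p.1, p.2), this, hpm⟩
  have fact2 : ∀ l ∈ S.map Prod.snd, ∃ m ∈ dp.values, l ≤ m := by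
    intro l hl
    obtain ⟨q, hq, hql⟩ := List.mem_map.mp hl
    cases hg : dp.get? q.1 with
    | none => exact absurd rfl ((h3 q.1).mp hg q hq)
    | some m =>
        refine ⟨m, ?_, hql ▸ (h4 q.1 m hg).2 q hq rfl⟩
        have := PySem.Dict.mem_items_of_get?_eq_some dp hg
        simp only [PySem.Dict.values, List.mem_map]
        exact ⟨(q.1, m), this, rfl⟩
  cases hA : PySem.List.max? dp.values (fun v => v) with
  | none =>
      cases hB : PySem.List.max? (S.map Prod.snd) (fun v => v) with
      | none => rfl
      | some m2 =>
          have hv : dp.values = [] := (PySem.List.max?_eq_none_iff _ _).mp hA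
          have hm2 := PySem.List.max?_mem hB
          obtain ⟨m, hm, _⟩ := fact2 m2 hm2
          rw [hv] at hm; simp at hm
  | some m =>
      cases hB : PySem.List.max? (S.map Prod.snd) (fun v => v) with
      | none =>
          have hv : S.map Prod.snd = [] := (PySem.List.max?_eq_none_iff _ _).mp hB
          have hm := fact1 m (PySem.List.max?_mem hA)
          rw [hv] at hm; simp at hm
      | some m2 =>
          have le1 : m ≤ m2 := PySem.List.max?_isMax hB m (fact1 m (PySem.List.max?_mem hA))
          obtain ⟨m', hm', hle⟩ := fact2 m2 (PySem.List.max?_mem hB)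
          exact le_antisymm le1 (le_trans hle (PySem.List.max?_isMax hA m' hm'))

lemma pvInv_fold (diff : Int) :
    ∀ (r : List Int) (dp : PySem.Dict Int Int) (S : List (Int × Int)), pvInv diff dp S →
      pvInv diff (r.foldl (pvStepA diff) dp) (r.foldl (pvStepS diff) S) := by
  intro r
  induction r with
  | nil => intro dp S h; exact h
  | cons x t ih => intro dp S h; exact ih _ _ (pvInv_step diff dp S x h)

lemma pvInv_empty (diff : Int) : pvInv diff PySem.Dict.empty [] := by
  refine ⟨PySem.Dict.nodup_keys_empty, by simp, by simp, ?_, ?_⟩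
  · intro v; simp [PySem.Dict.get?_empty]
  · intro v m h; simp [PySem.Dict.get?_empty] at h


-- ===== VERDICT (by name: the statement is the Claim_ definition above) =====
theorem longest_increasing_subsequence_with_diff_spec : Claim_equal_longest_increasing_subsequence_with_diff := by
  intro nums diff _
  unfold Spec_longest_increasing_subsequence_with_diff
  unfold longest_increasing_subsequence_with_diff longest_increasing_subsequence_with_diff_alt
  have hz := pvZipB diff nums [] [] rfl
  simp only [List.nil_append, List.zip_nil_right] at hz
  obtain ⟨hlen, hzip⟩ := hz
  have hinv := pvInv_fold diff nums PySem.Dict.empty [] (pvInv_empty diff)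
  rw [pvExtract diff _ _ (hzip ▸ hinv)]
  congr 1
  exact (List.map_snd_zip (le_of_eq hlen)).symm ▸ rfl
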